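-- pv_equiv track=rewrite | github.com/shivraj110504/ipc-section | backend/script/retrieve_sections.py | _section_sort_key
-- ===== SOURCE A (Python) =====
-- def _section_sort_key(section_number: str) -> tuple[int, str]:
--     section_number = str(section_number).strip()
--     digits = ""
--     suffix = ""
--     for char in section_number:
--         if char.isdigit() and suffix == "":
--             digits += char
--         else:
--             suffix += char
--     numeric_part = int(digits) if digits else 0
--     return numeric_part, suffix
-- ===== SOURCE B (Python) =====
-- def _section_sort_key(section_number: str) -> tuple[int, str]:
--     s = str(section_number).strip()
--     i = 0
--     while i < len(s) and s[i].isdigit():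
--         i += 1
--     return (int(s[:i]) if i else 0, s[i:])
-- ===== Notes on version B (the rewrite author's own statement) =====
-- stated objective: simpler
-- what changed: B finds the digit/suffix boundary with a single index scan and returns two slices, instead of A's char-by-char loop that grows two accumulator strings under a suffix-emptiness flag.
import Mathlib
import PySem

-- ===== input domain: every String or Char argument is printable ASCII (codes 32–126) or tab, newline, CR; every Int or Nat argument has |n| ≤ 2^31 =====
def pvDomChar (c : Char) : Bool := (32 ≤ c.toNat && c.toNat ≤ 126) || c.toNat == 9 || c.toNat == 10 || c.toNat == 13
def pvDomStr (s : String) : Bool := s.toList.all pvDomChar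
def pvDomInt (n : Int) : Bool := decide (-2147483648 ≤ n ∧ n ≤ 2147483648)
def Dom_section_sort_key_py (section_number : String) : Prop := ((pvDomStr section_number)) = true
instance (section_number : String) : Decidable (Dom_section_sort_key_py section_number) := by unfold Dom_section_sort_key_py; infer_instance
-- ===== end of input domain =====

-- B changes the decomposition only: a single boundary-index scan plus two slices, instead of A's
-- two growing accumulator strings; same linear cost (objective: simpler).

-- ===== PORT A =====
-- A: strip, then loop over chars growing (digits, suffix); int(digits) via PySem.Int.ofChars?
-- (on all-ASCII digit runs int() always succeeds, so the .getD 0 default is never taken).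
def section_sort_key_py (section_number : String) : Int × String :=
  let cs := PySem.Chars.strip section_number.toList
  let st := cs.foldl
    (fun (acc : List Char × List Char) c =>
      if PySem.Chars.isdigit c && acc.2.isEmpty then (acc.1 ++ [c], acc.2)
      else (acc.1, acc.2 ++ [c])) ([], [])
  let numeric : Int := if st.1.isEmpty then 0 else (PySem.Int.ofChars? st.1).getD 0
  (numeric, String.mk st.2)

-- ===== PORT B =====
-- B: scan for the first non-digit index i (the while loop), then slice s[:i] / s[i:]
-- (i is a nonnegative in-range index, so the slices are take/drop exactly).
def pvScanB : List Char → Nat → Nat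
  | [], i => i
  | c :: rest, i => if PySem.Chars.isdigit c then pvScanB rest (i + 1) else i

def section_sort_key_py_alt (section_number : String) : Int × String :=
  let cs := PySem.Chars.strip section_number.toList
  let i := pvScanB cs 0
  let numeric : Int := if i ≠ 0 then (PySem.Int.ofChars? (cs.take i)).getD 0 else 0
  (numeric, String.mk (cs.drop i))

-- ===== PRECONDITION & SPEC =====
def Spec_section_sort_key_py (section_number : String) (out : Int × String) : Prop := out = section_sort_key_py_alt section_number
instance (section_number : String) (out : Int × String) : Decidable (Spec_section_sort_key_py section_number out) := by unfold Spec_section_sort_key_py; infer_instance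

-- ===== CLAIM (what is proved, stated in full; the proofs are below) =====
def Claim_equal_section_sort_key_py : Prop := ∀ (section_number : String), Dom_section_sort_key_py section_number → Spec_section_sort_key_py section_number (section_sort_key_py section_number)

-- ===== LEMMAS AND PROOFS =====

-- once the suffix is nonempty, A's loop only appends to it
lemma pv_fold_suffix (cs : List Char) : ∀ (d s : List Char), s ≠ [] →
    cs.foldl (fun (acc : List Char × List Char) c =>
      if PySem.Chars.isdigit c && acc.2.isEmpty then (acc.1 ++ [c], acc.2)
      else (acc.1, acc.2 ++ [c])) (d, s) = (d, s ++ cs) := by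
  induction cs with
  | nil => intro d s _; simp
  | cons c rest ih =>
    intro d s hs
    simp only [List.foldl_cons]
    rw [if_neg (by simp [List.isEmpty_iff, hs]), ih d (s ++ [c]) (by simp)]
    simp

-- A's loop from the empty state splits off the leading digit run
lemma pv_fold_eq (cs : List Char) : ∀ (d : List Char),
    cs.foldl (fun (acc : List Char × List Char) c =>
      if PySem.Chars.isdigit c && acc.2.isEmpty then (acc.1 ++ [c], acc.2)
      else (acc.1, acc.2 ++ [c])) (d, []) =
    (d ++ cs.takeWhile PySem.Chars.isdigit, cs.dropWhile PySem.Chars.isdigit) := by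
  induction cs with
  | nil => intro d; simp
  | cons c rest ih =>
    intro d
    by_cases h : PySem.Chars.isdigit c
    · simp only [List.foldl_cons, h, List.isEmpty_nil, Bool.and_self, if_pos, List.takeWhile_cons,
        List.dropWhile_cons]
      rw [ih (d ++ [c])]
      simp [h]
    · simp only [List.foldl_cons, h, Bool.false_and, Bool.false_eq_true, if_false,
        List.nil_append]
      rw [pv_fold_suffix rest d [c] (by simp)]
      simp [List.takeWhile_cons, List.dropWhile_cons, h]

-- B's index scan counts the leading digit run
lemma pv_scan_eq (cs : List Char) : ∀ (i : Nat),
    pvScanB cs i = i + (cs.takeWhile PySem.Chars.isdigit).length := by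
  induction cs with
  | nil => intro i; simp [pvScanB]
  | cons c rest ih =>
    intro i
    by_cases h : PySem.Chars.isdigit c
    · simp [pvScanB, h, List.takeWhile_cons, ih]; omega
    · simp [pvScanB, h, List.takeWhile_cons]

lemma pv_take_takeWhile {p : Char → Bool} (cs : List Char) :
    cs.take (cs.takeWhile p).length = cs.takeWhile p := by
  induction cs with
  | nil => simp
  | cons c rest ih =>
    by_cases h : p c <;> simp [List.takeWhile_cons, h, ih]

lemma pv_drop_takeWhile {p : Char → Bool} (cs : List Char) :
    cs.drop (cs.takeWhile p).length = cs.dropWhile p := by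
  induction cs with
  | nil => simp
  | cons c rest ih =>
    by_cases h : p c <;> simp [List.takeWhile_cons, List.dropWhile_cons, h, ih]

-- ===== VERDICT (by name: the statement is the Claim_ definition above) =====
theorem section_sort_key_py_spec : Claim_equal_section_sort_key_py := by
  intro s _
  unfold Spec_section_sort_key_py section_sort_key_py section_sort_key_py_alt
  simp only [pv_fold_eq _ [], List.nil_append, pv_scan_eq, Nat.zero_add,
    pv_take_takeWhile, pv_drop_takeWhile]
  congr 1
  by_cases h : (PySem.Chars.strip s.toList).takeWhile PySem.Chars.isdigit = []
  · simp [h]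
  · simp [List.isEmpty_iff, h, List.length_eq_zero_iff]
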